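-- pv_equiv track=rewrite | github.com/KamalAres/Infytq | Infytq/Day6/Exer-32.py | find_maximum_people
-- ===== SOURCE A (Python) =====
-- def human_pyramid(no_of_people):
--     #pass #remove pass and place the recursive code the you had written earlier for this function
--     if no_of_people==1:
--         return 50
--     else:
--         return no_of_people*(50)+human_pyramid(no_of_people-2)
--
-- def find_maximum_people(max_weight):
--     no_of_people=0
--     #write your logic here. You may invoke recursive function human_pyramid() wherever applicable
--     count=0
--     for i in range(1,max_weight+1,2):
--         if human_pyramid(i)>max_weight:
--             break
--         else:
--             count=i
--     no_of_people=count
--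
--     return no_of_people
-- ===== SOURCE B (Python) =====
-- def find_maximum_people(max_weight):
--     # Binary search for the largest k >= 1 with 50*k*k <= max_weight;
--     # the answer (number of people) is then the odd number 2*k - 1.
--     if max_weight < 50:
--         return 0
--     lo, hi = 1, max_weight
--     while lo < hi:
--         mid = (lo + hi + 1) // 2
--         if 50 * mid * mid <= max_weight:
--             lo = mid
--         else:
--             hi = mid - 1
--     return 2 * lo - 1
-- ===== Notes on version B (the rewrite author's own statement) =====
-- stated objective: faster
-- what changed: Replaces the linear scan over odd i with repeated recursive pyramid-weight evaluation by a binary search for the largest k with 50*k*k <= max_weight, returning 2*k-1.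
import Mathlib
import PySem

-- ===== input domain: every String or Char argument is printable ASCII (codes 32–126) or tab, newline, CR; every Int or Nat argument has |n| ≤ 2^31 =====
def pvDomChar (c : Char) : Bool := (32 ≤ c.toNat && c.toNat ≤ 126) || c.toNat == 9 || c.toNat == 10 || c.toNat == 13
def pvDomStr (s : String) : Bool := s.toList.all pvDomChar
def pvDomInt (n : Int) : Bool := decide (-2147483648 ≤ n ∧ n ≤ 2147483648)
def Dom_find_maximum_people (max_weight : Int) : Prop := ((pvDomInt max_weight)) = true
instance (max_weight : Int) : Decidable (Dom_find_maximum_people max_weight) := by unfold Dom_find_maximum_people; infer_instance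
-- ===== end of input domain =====

-- B replaces A's linear scan (which recomputes the pyramid weight recursively for every
-- odd candidate) by a binary search for the largest k with 50*k*k <= max_weight.

-- ===== PORT A =====
-- Python's human_pyramid tests `no_of_people == 1` and recurses on n-2 otherwise; it
-- diverges for n ≤ 0 and even n, which find_maximum_people never passes (it only calls
-- it on odd n ≥ 1, where this port is exact; the `n ≤ 1` guard only makes it total).
def human_pyramid (n : Int) : Int :=
  if n ≤ 1 then 50
  else n * 50 + human_pyramid (n - 2)
termination_by n.toNat
decreasing_by omega

-- the `for i in range(1, max_weight+1, 2): … break …` loop, with `count` as accumulator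
def pvLoopA (m : Int) : List Int → Int → Int
  | [], count => count
  | i :: rest, count =>
    if human_pyramid i > m then count else pvLoopA m rest i

def find_maximum_people (max_weight : Int) : Int :=
  pvLoopA max_weight (PySem.List.pyRange 1 (max_weight + 1) 2) 0

-- ===== PORT B =====
-- helper fact the binary search needs for termination
theorem pvMid_bounds (lo hi : Int) (h : lo < hi) :
    lo < PySem.Int.floordiv (lo + hi + 1) 2 ∧ PySem.Int.floordiv (lo + hi + 1) 2 ≤ hi := by
  show lo < (lo + hi + 1).fdiv 2 ∧ (lo + hi + 1).fdiv 2 ≤ hi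
  rw [Int.fdiv_eq_ediv, if_pos (Or.inl (by norm_num : (0:Int) ≤ 2))]
  omega

-- the `while lo < hi` binary-search loop of Source B
def pvBSearch (m lo hi : Int) : Int :=
  if h : lo < hi then
    let mid := PySem.Int.floordiv (lo + hi + 1) 2
    if 50 * mid * mid ≤ m then pvBSearch m mid hi
    else pvBSearch m lo (mid - 1)
  else lo
termination_by (hi - lo).toNat
decreasing_by
  · have := pvMid_bounds lo hi h; omega
  · have := pvMid_bounds lo hi h; omega

def find_maximum_people_alt (max_weight : Int) : Int :=
  if max_weight < 50 then 0
  else 2 * pvBSearch max_weight 1 max_weight - 1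

-- ===== PRECONDITION & SPEC =====
def Spec_find_maximum_people (max_weight : Int) (out : Int) : Prop := out = find_maximum_people_alt max_weight
instance (max_weight : Int) (out : Int) : Decidable (Spec_find_maximum_people max_weight out) := by unfold Spec_find_maximum_people; infer_instance

-- ===== CLAIM (what is proved, stated in full; the proofs are below) =====
def Claim_equal_find_maximum_people : Prop := ∀ (max_weight : Int), Dom_find_maximum_people max_weight → Spec_find_maximum_people max_weight (find_maximum_people max_weight)

-- ===== LEMMAS AND PROOFS =====

-- the common specification value: largest k with 50*k*k ≤ m (0 when m < 50)
def pvK (m : Int) : Int := (Nat.sqrt (m.toNat / 50) : Int)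

theorem pvK_iff (m k : Int) (hk : 1 ≤ k) : 50 * k * k ≤ m ↔ k ≤ pvK m := by
  unfold pvK
  obtain ⟨a, rfl⟩ : ∃ a : Nat, (a : Int) = k := ⟨k.toNat, by omega⟩
  have ha : 1 ≤ a := by exact_mod_cast hk
  constructor
  · intro h
    have hm : (0:Int) ≤ m := by nlinarith
    have h2 : ((a:Int)) * a * 50 ≤ (m.toNat : Int) := by
      rw [Int.toNat_of_nonneg hm]; nlinarith
    have hN : a * a * 50 ≤ m.toNat := by exact_mod_cast h2
    exact_mod_cast Nat.le_sqrt.mpr ((Nat.le_div_iff_mul_le (by norm_num)).mpr hN)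
  · intro h
    have h' : a ≤ Nat.sqrt (m.toNat / 50) := by exact_mod_cast h
    have h3 : a * a * 50 ≤ m.toNat := (Nat.le_div_iff_mul_le (by norm_num)).mp (Nat.le_sqrt.mp h')
    have hm : (0:Int) ≤ m := by
      by_contra hneg
      have : m.toNat = 0 := by omega
      rw [this] at h3
      nlinarith
    calc (50:Int) * a * a = ((a * a * 50 : Nat) : Int) := by push_cast; ring
      _ ≤ (m.toNat : Int) := by exact_mod_cast h3
      _ = m := Int.toNat_of_nonneg hm

-- human_pyramid on an odd positive argument: human_pyramid (2k-1) = 50*k^2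
theorem human_pyramid_odd (k : Nat) : human_pyramid (2 * (k + 1) - 1) = 50 * (k + 1) * (k + 1) := by
  induction k with
  | zero => simp [human_pyramid]
  | succ n ih =>
    push_cast
    rw [human_pyramid, if_neg (by omega)]
    have h2 : 2 * ((n : Int) + 1 + 1) - 1 - 2 = 2 * ((n : Int) + 1) - 1 := by ring
    rw [h2, ih]
    ring

theorem human_pyramid_odd' (k : Int) (hk : 1 ≤ k) : human_pyramid (2 * k - 1) = 50 * k * k := by
  obtain ⟨a, rfl⟩ : ∃ a : Nat, (a : Int) + 1 = k := ⟨(k - 1).toNat, by omega⟩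
  have := human_pyramid_odd a
  push_cast at this ⊢
  convert this using 2

-- step-2 range unfolding lemmas
theorem pyRange2_nil (a b : Int) (h : b ≤ a) : PySem.List.pyRange a b 2 = [] := by
  rw [PySem.List.pyRange_of_pos a b (by norm_num)]
  rw [if_neg (by omega)]
  simp

theorem pyRange2_cons (a b : Int) (h : a < b) :
    PySem.List.pyRange a b 2 = a :: PySem.List.pyRange (a + 2) b 2 := by
  rw [PySem.List.pyRange_of_pos a b (by norm_num),
      PySem.List.pyRange_of_pos (a + 2) b (by norm_num)]
  rw [if_pos h]
  by_cases h2 : a + 2 < b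
  · rw [if_pos h2]
    have hN : ((b - a + 2 - 1) / 2).toNat = ((b - (a + 2) + 2 - 1) / 2).toNat + 1 := by omega
    rw [hN, List.range_succ_eq_map]
    simp only [List.map_cons, List.map_map]
    congr 1
    · norm_num
    · apply List.map_congr_left
      intro x _
      simp only [Function.comp_apply]
      push_cast
      ring
  · rw [if_neg h2]
    have hN : ((b - a + 2 - 1) / 2).toNat = 1 := by omega
    rw [hN]
    simp

-- A's loop, run from candidate 2k-1 with accumulator c
theorem loopA_run (m : Int) : ∀ (fuel : Nat) (k c : Int), 1 ≤ k →
    (m + 1 - (2 * k - 1)).toNat ≤ fuel →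
    pvLoopA m (PySem.List.pyRange (2 * k - 1) (m + 1) 2) c =
      if 50 * k * k ≤ m then 2 * pvK m - 1 else c := by
  intro fuel
  induction fuel with
  | zero =>
    intro k c hk hfuel
    have hgt : m < 2 * k - 1 := by omega
    rw [pyRange2_nil _ _ (by omega)]
    rw [if_neg]
    · rfl
    · intro hle
      nlinarith
  | succ n ih =>
    intro k c hk hfuel
    by_cases hin : 2 * k - 1 < m + 1
    · rw [pyRange2_cons _ _ hin]
      show (if human_pyramid (2 * k - 1) > m then c
            else pvLoopA m (PySem.List.pyRange (2 * k - 1 + 2) (m + 1) 2) (2 * k - 1)) = _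
      rw [human_pyramid_odd' k hk]
      by_cases hw : 50 * k * k ≤ m
      · rw [if_neg (by omega), if_pos hw]
        have harg : 2 * k - 1 + 2 = 2 * (k + 1) - 1 := by ring
        rw [harg, ih (k + 1) (2 * k - 1) (by omega) (by omega)]
        by_cases hw2 : 50 * (k + 1) * (k + 1) ≤ m
        · rw [if_pos hw2]
        · rw [if_neg hw2]
          have h1 : k ≤ pvK m := (pvK_iff m k hk).mp hw
          have h2 : ¬ (k + 1 ≤ pvK m) := fun hc => hw2 ((pvK_iff m (k + 1) (by omega)).mpr hc)
          omega
      · rw [if_pos (by omega), if_neg hw]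
    · rw [pyRange2_nil _ _ (by omega)]
      rw [if_neg]
      · rfl
      · intro hle
        nlinarith
  
-- B's binary search, under its loop invariant lo ≤ pvK m ≤ hi
theorem bsearch_run (m : Int) : ∀ (fuel : Nat) (lo hi : Int),
    (hi - lo).toNat ≤ fuel → 1 ≤ lo → lo ≤ pvK m → pvK m ≤ hi →
    pvBSearch m lo hi = pvK m := by
  intro fuel
  induction fuel with
  | zero =>
    intro lo hi hfuel hlo h1 h2
    rw [pvBSearch, dif_neg (by omega : ¬ lo < hi)]
    omega
  | succ n ih =>
    intro lo hi hfuel hlo h1 h2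
    by_cases h : lo < hi
    · rw [pvBSearch, dif_pos h]
      have hmid := pvMid_bounds lo hi h
      set mid := PySem.Int.floordiv (lo + hi + 1) 2 with hmiddef
      by_cases hc : 50 * mid * mid ≤ m
      · rw [if_pos hc]
        have hmk : mid ≤ pvK m := (pvK_iff m mid (by omega)).mp hc
        exact ih mid hi (by omega) (by omega) hmk h2
      · rw [if_neg hc]
        have hmk : ¬ (mid ≤ pvK m) := fun hc' => hc ((pvK_iff m mid (by omega)).mpr hc')
        exact ih lo (mid - 1) (by omega) hlo h1 (by omega)
    · rw [pvBSearch, dif_neg h]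
      omega

-- ===== VERDICT (by name: the statement is the Claim_ definition above) =====
theorem find_maximum_people_spec : Claim_equal_find_maximum_people := by
  unfold Claim_equal_find_maximum_people Spec_find_maximum_people
  intro m _
  unfold find_maximum_people find_maximum_people_alt
  have hone : (1 : Int) = 2 * 1 - 1 := by norm_num
  have hA := loopA_run m ((m + 1 - 1).toNat) 1 0 (by norm_num) (by omega)
  norm_num at hA
  rw [hA]
  by_cases h50 : 50 ≤ m
  · rw [if_pos h50, if_neg (by omega)]
    have hK1 : 1 ≤ pvK m := (pvK_iff m 1 (by norm_num)).mp (by omega)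
    have hKm : 50 * pvK m * pvK m ≤ m := (pvK_iff m (pvK m) hK1).mpr le_rfl
    have hKle : pvK m ≤ m := by nlinarith
    rw [bsearch_run m (m - 1).toNat 1 m (by omega) (by norm_num) hK1 hKle]
  · rw [if_neg (by omega), if_pos (by omega)]
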